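-- pv_equiv track=rewrite | github.com/lks-g/prog1-2021 | cv6 - advanced-math/task8.py | fibonacci_index
-- ===== SOURCE A (Python) =====
-- cache = {}
--
-- def fibonacci(n):
--   if n in cache:
--     return cache[n]
--   if n == 0:
--     value = 0
--   elif n == 1:
--     value = 1
--   else:
--     value = fibonacci(n - 1) + fibonacci(n - 2)
--   cache[n] = value
--   return value
--
-- def fibonacci_index(x):
--   index = 0
--   while True:
--     fib_cislo = fibonacci(index)
--     if fib_cislo == x:
--       return index
--     elif fib_cislo < x:
--       index += 1
--     else:
--       return -1
-- ===== SOURCE B (Python) =====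
-- def fibonacci_index(x):
--     a, b, index = 0, 1, 0
--     while a < x:
--         a, b = b, a + b
--         index += 1
--     return index if a == x else -1
-- ===== Notes on version B (the rewrite author's own statement) =====
-- stated objective: simpler
-- what changed: Replaces the globally-memoized recursive fibonacci helper plus an index loop calling it with a single iterative loop maintaining a rolling pair (a,b) of consecutive Fibonacci numbers.
import Mathlib
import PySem

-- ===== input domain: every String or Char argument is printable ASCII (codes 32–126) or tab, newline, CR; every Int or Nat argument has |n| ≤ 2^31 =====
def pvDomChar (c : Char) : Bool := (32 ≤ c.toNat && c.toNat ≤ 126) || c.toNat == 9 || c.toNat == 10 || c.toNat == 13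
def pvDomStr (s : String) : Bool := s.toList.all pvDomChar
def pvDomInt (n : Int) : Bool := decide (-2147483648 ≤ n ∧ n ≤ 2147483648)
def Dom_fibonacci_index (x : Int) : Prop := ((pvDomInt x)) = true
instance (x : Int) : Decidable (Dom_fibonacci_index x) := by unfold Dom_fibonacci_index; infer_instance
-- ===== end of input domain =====

-- B replaces the memoized recursive fibonacci helper + index loop with one rolling-pair loop (simpler).

-- ===== PORT A =====
-- A's `fibonacci` with the global `cache` dict threaded through explicitly (value, updated cache);
-- the loop index is a natural counter, so the recursion is on Nat.
def fibMemoA (c : PySem.Dict Int Int) (n : Nat) : Int × PySem.Dict Int Int :=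
  match c.get? (n : Int) with
  | some v => (v, c)
  | none =>
    match n with
    | 0 => (0, c.insert (0 : Int) 0)
    | 1 => (1, c.insert (1 : Int) 1)
    | m + 2 =>
      let p1 := fibMemoA c (m + 1)
      let p2 := fibMemoA p1.2 m
      let value := p1.1 + p2.1
      (value, p2.2.insert ((m + 2 : Nat) : Int) value)

-- A's `while True` loop; `fuel` is a totality guard only (never exhausted on the stated domain,
-- and identical in both ports, so the lockstep proof needs no sufficiency argument).
def loopA (c : PySem.Dict Int Int) (index : Nat) (x : Int) (fuel : Nat) : Int :=
  match fuel with
  | 0 => -1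
  | fuel + 1 =>
    if (fibMemoA c index).1 = x then (index : Int)
    else if (fibMemoA c index).1 < x then loopA (fibMemoA c index).2 (index + 1) x fuel
    else -1

def fibonacci_index (x : Int) : Int :=
  loopA PySem.Dict.empty 0 x (x.toNat + 2)

-- ===== PORT B =====
-- B's `while a < x` loop with the same totality fuel.
def loopB (a b : Int) (index : Nat) (x : Int) (fuel : Nat) : Int :=
  match fuel with
  | 0 => -1
  | fuel + 1 =>
    if a < x then loopB b (a + b) (index + 1) x fuel
    else if a = x then (index : Int) else -1

def fibonacci_index_alt (x : Int) : Int :=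
  loopB 0 1 0 x (x.toNat + 2)

-- ===== PRECONDITION & SPEC =====
def Spec_fibonacci_index (x : Int) (out : Int) : Prop := out = fibonacci_index_alt x
instance (x : Int) (out : Int) : Decidable (Spec_fibonacci_index x out) := by unfold Spec_fibonacci_index; infer_instance

-- ===== CLAIM (what is proved, stated in full; the proofs are below) =====
def Claim_equal_fibonacci_index : Prop := ∀ (x : Int), Dom_fibonacci_index x → Spec_fibonacci_index x (fibonacci_index x)

-- ===== LEMMAS AND PROOFS =====

-- Mathematical Fibonacci, proof-side reference.
def fibZ : Nat → Int
  | 0 => 0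
  | 1 => 1
  | n + 2 => fibZ (n + 1) + fibZ n

-- cache invariant: every Nat-keyed entry stores the right Fibonacci value
def InvCache (c : PySem.Dict Int Int) : Prop :=
  ∀ (m : Nat) (v : Int), c.get? (m : Int) = some v → v = fibZ m

lemma invCache_insert {c : PySem.Dict Int Int} (h : InvCache c) (k : Nat) :
    InvCache (c.insert (k : Int) (fibZ k)) := by
  intro m v hv
  rw [PySem.Dict.get?_insert] at hv
  split at hv
  · rename_i heq
    have : m = k := by exact_mod_cast heq
    subst this
    exact (Option.some.inj hv).symm
  · exact h m v hv

lemma fibMemoA_correct : ∀ (n : Nat) (c : PySem.Dict Int Int), InvCache c →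
    (fibMemoA c n).1 = fibZ n ∧ InvCache (fibMemoA c n).2 := by
  intro n
  induction n using Nat.strong_induction_on with
  | _ n ih =>
    intro c hc
    unfold fibMemoA
    cases hget : c.get? (n : Int) with
    | some v => exact ⟨hc n v hget, hc⟩
    | none =>
      match n with
      | 0 => exact ⟨rfl, invCache_insert hc 0⟩
      | 1 => exact ⟨rfl, invCache_insert hc 1⟩
      | m + 2 =>
        simp only
        obtain ⟨h1, hc1⟩ := ih (m + 1) (by omega) c hc
        obtain ⟨h2, hc2⟩ := ih m (by omega) (fibMemoA c (m + 1)).2 hc1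
        refine ⟨by rw [h1, h2]; rfl, ?_⟩
        have := invCache_insert hc2 (m + 2)
        rwa [show fibZ (m + 2) = (fibMemoA c (m+1)).1 + (fibMemoA (fibMemoA c (m+1)).2 m).1 by
          rw [h1, h2]; rfl] at this

lemma loop_lockstep : ∀ (fuel i : Nat) (c : PySem.Dict Int Int) (x : Int), InvCache c →
    loopA c i x fuel = loopB (fibZ i) (fibZ (i + 1)) i x fuel := by
  intro fuel
  induction fuel with
  | zero => intro i c x _; rfl
  | succ fuel ih =>
    intro i c x hc
    obtain ⟨hv, hc'⟩ := fibMemoA_correct i c hc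
    unfold loopA loopB
    rw [hv]
    by_cases heq : fibZ i = x
    · simp [heq]
    · by_cases hlt : fibZ i < x
      · simp only [heq, hlt, if_true, if_false]
        rw [ih (i + 1) _ x hc']
        have : fibZ i + fibZ (i + 1) = fibZ (i + 1 + 1) := by
          show _ = fibZ (i + 2); rw [fibZ]; ring
        rw [this]
      · simp [heq, hlt]

-- ===== VERDICT (by name: the statement is the Claim_ definition above) =====
theorem fibonacci_index_spec : Claim_equal_fibonacci_index := by
  intro x _
  show fibonacci_index x = fibonacci_index_alt x
  unfold fibonacci_index fibonacci_index_alt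
  have h0 : InvCache PySem.Dict.empty := by
    intro m v hv
    simp [PySem.Dict.get?_empty] at hv
  simpa using loop_lockstep (x.toNat + 2) 0 PySem.Dict.empty x h0
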